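-- pv_equiv track=rewrite | github.com/gmftbyGMFTBY/OpenDialog | utils/hash_positive_generate.py | obtain_length
-- ===== SOURCE A (Python) =====
-- def obtain_length(ctx, max_length):
--     utterances = ctx.split('[SEP]')
--     l = 0
--     chose_utterances = []
--     for u in reversed(utterances):
--         u = u.strip()
--         l += len(u)
--         if l < max_length:
--             chose_utterances.append(u)
--         else:
--             break
--     if not chose_utterances:
--         chose_utterances.append(utterances[-1][-max_length:])
--     chose_utterances = list(reversed(chose_utterances))
--     u = ' [SEP] '.join(chose_utterances)
--     return u
-- ===== SOURCE B (Python) =====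
-- def obtain_length(ctx, max_length):
--     parts = [u.strip() for u in ctx.split('[SEP]')]
--     # cumulative character lengths of the utterances, newest (last) first
--     cums = []
--     t = 0
--     for u in reversed(parts):
--         t += len(u)
--         cums.append(t)
--     # binary search (bisect_left) for the first cumulative sum >= max_length:
--     # k = number of most-recent utterances that fit under the budget
--     lo, hi = 0, len(cums)
--     while lo < hi:
--         mid = (lo + hi) // 2
--         if cums[mid] < max_length:
--             lo = mid + 1
--         else:
--             hi = mid
--     if lo == 0:
--         return ctx.split('[SEP]')[-1][-max_length:]
--     return ' [SEP] '.join(parts[len(parts) - lo:])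
-- ===== Notes on version B (the rewrite author's own statement) =====
-- stated objective: alternative
-- what changed: Replaces the reverse accumulate-and-break loop over utterance strings with a precomputed cumulative-length table, a binary search (bisect_left by hand) for the cutoff, and a single suffix slice of the stripped parts joined without any output reversal.
import Mathlib
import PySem

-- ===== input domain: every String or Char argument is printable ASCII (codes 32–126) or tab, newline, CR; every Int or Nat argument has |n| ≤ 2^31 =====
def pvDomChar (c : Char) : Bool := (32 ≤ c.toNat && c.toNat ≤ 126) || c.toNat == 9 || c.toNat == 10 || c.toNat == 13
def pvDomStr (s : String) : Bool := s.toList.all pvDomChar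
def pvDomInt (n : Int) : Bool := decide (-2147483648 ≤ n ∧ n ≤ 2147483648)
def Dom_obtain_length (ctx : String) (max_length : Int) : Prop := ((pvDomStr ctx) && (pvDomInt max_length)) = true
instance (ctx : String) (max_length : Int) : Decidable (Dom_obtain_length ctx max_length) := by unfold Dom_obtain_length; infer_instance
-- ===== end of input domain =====

-- B replaces A's reverse accumulate-and-break loop with a cumulative-length table,
-- a hand-written binary search for the cutoff, and a single suffix slice (objective: alternative).

-- ===== PORT A =====
-- the 'for u in reversed(utterances): … break' loop of A, carried state (l, chose_utterances)
def pvGoA (ml : Int) : List String → Int → List String → List String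
  | [], _, acc => acc
  | u :: rest, l, acc =>
    let u' := PySem.Str.strip u
    let l' := l + PySem.Str.len u'
    if l' < ml then pvGoA ml rest l' (acc ++ [u']) else acc

def obtain_length (ctx : String) (max_length : Int) : String :=
  let utterances := (PySem.Str.split? ctx "[SEP]").getD []   -- sep ≠ "", so split? is always some
  let chosen := pvGoA max_length utterances.reverse 0 []
  -- utterances[-1]: str.split always returns a non-empty list, so the index is in range
  let chosen := if chosen = [] then
      chosen ++ [PySem.Str.slice ((PySem.List.pyGet? utterances (-1)).getD "") (some (-max_length)) none]
    else chosen
  PySem.Str.join " [SEP] " chosen.reverse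

-- ===== PORT B =====
-- hand-written bisect_left while-loop of Source B
def pvBsearch (cums : List Int) (target : Int) (lo hi : Nat) : Nat :=
  if h : lo < hi then
    let mid := (lo + hi) / 2
    if cums.getD mid 0 < target then pvBsearch cums target (mid + 1) hi
    else pvBsearch cums target lo mid
  else lo
termination_by hi - lo
decreasing_by all_goals omega

def obtain_length_alt (ctx : String) (max_length : Int) : String :=
  let us := (PySem.Str.split? ctx "[SEP]").getD []           -- sep ≠ "", so split? is always some
  let parts := us.map PySem.Str.strip
  -- cumulative character lengths, newest (last) utterance first
  let cums := ((parts.reverse).foldl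
      (fun (p : Int × List Int) u => (p.1 + PySem.Str.len u, p.2 ++ [p.1 + PySem.Str.len u]))
      (0, [])).2
  let lo := pvBsearch cums max_length 0 cums.length
  if lo = 0 then
    -- ctx.split('[SEP]')[-1]: split always returns a non-empty list, so the index is in range
    PySem.Str.slice ((PySem.List.pyGet? us (-1)).getD "") (some (-max_length)) none
  else
    PySem.Str.join " [SEP] " (parts.drop (parts.length - lo))

-- ===== PRECONDITION & SPEC =====
def Spec_obtain_length (ctx : String) (max_length : Int) (out : String) : Prop := out = obtain_length_alt ctx max_length
instance (ctx : String) (max_length : Int) (out : String) : Decidable (Spec_obtain_length ctx max_length out) := by unfold Spec_obtain_length; infer_instance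

-- ===== CLAIM (what is proved, stated in full; the proofs are below) =====
def Claim_equal_obtain_length : Prop := ∀ (ctx : String) (max_length : Int), Dom_obtain_length ctx max_length → Spec_obtain_length ctx max_length (obtain_length ctx max_length)

-- ===== LEMMAS AND PROOFS =====

-- how many leading elements A's loop takes, on the list of (stripped) lengths
def pvCnt (ml : Int) : List Int → Int → Nat
  | [], _ => 0
  | L :: rest, l => if l + L < ml then pvCnt ml rest (l + L) + 1 else 0

-- running sums of a length list, starting from t
def pvCums (t : Int) : List Int → List Int
  | [] => []
  | L :: rest => (t + L) :: pvCums (t + L) rest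

theorem pvGoA_eq_take (ml : Int) (xs : List String) : ∀ (l : Int) (acc : List String),
    pvGoA ml xs l acc =
      acc ++ (xs.map PySem.Str.strip).take (pvCnt ml (xs.map (fun u => PySem.Str.len (PySem.Str.strip u))) l) := by
  induction xs with
  | nil => intro l acc; simp [pvGoA, pvCnt]
  | cons u rest ih =>
    intro l acc
    simp only [pvGoA, pvCnt, List.map_cons]
    split_ifs with h
    · rw [ih]; simp
    · simp

theorem pvCums_fold (xs : List String) : ∀ (t : Int) (acc : List Int),
    (xs.foldl (fun (p : Int × List Int) u => (p.1 + PySem.Str.len u, p.2 ++ [p.1 + PySem.Str.len u])) (t, acc)).2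
      = acc ++ pvCums t (xs.map PySem.Str.len) := by
  induction xs with
  | nil => intro t acc; simp [pvCums]
  | cons u rest ih => intro t acc; simp only [List.foldl_cons, List.map_cons, pvCums]; rw [ih]; simp

theorem pvCums_length (ls : List Int) : ∀ t, (pvCums t ls).length = ls.length := by
  induction ls with
  | nil => simp [pvCums]
  | cons L rest ih => intro t; simp [pvCums, ih]

theorem pvCums_lb (ls : List Int) (hnn : ∀ L ∈ ls, 0 ≤ L) : ∀ t, ∀ x ∈ pvCums t ls, t ≤ x := by
  induction ls with
  | nil => simp [pvCums]
  | cons L rest ih =>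
    intro t x hx
    simp only [pvCums, List.mem_cons] at hx
    have hL : 0 ≤ L := hnn L (by simp)
    rcases hx with rfl | hx
    · omega
    · have := ih (fun L' h => hnn L' (by simp [h])) (t + L) x hx; omega

theorem pvCums_mono (ls : List Int) (hnn : ∀ L ∈ ls, 0 ≤ L) :
    ∀ t i j, i ≤ j → j < ls.length → (pvCums t ls).getD i 0 ≤ (pvCums t ls).getD j 0 := by
  induction ls with
  | nil => intro t i j _ hj; simp at hj
  | cons L rest ih =>
    intro t i j hij hj
    simp only [pvCums]
    match i, j with
    | 0, 0 => simp
    | 0, j + 1 =>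
      simp only [List.getD_cons_zero, List.getD_cons_succ]
      have hjlen : j < rest.length := by simpa using hj
      have hmem : (pvCums (t + L) rest).getD j 0 ∈ pvCums (t + L) rest := by
        have hl : j < (pvCums (t + L) rest).length := by rw [pvCums_length]; exact hjlen
        rw [List.getD_eq_getElem _ _ hl]
        exact List.getElem_mem hl
      exact pvCums_lb rest (fun L' h => hnn L' (by simp [h])) (t + L) _ hmem
    | i + 1, j + 1 =>
      simp only [List.getD_cons_succ]
      exact ih (fun L' h => hnn L' (by simp [h])) (t + L) i j (by omega) (by simpa using hj)

-- characterization of A's count against the cumulative table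
theorem pvCnt_spec (ml : Int) (ls : List Int) : ∀ l,
    pvCnt ml ls l ≤ ls.length ∧
    (∀ i < pvCnt ml ls l, (pvCums l ls).getD i 0 < ml) ∧
    (pvCnt ml ls l < ls.length → ¬ (pvCums l ls).getD (pvCnt ml ls l) 0 < ml) := by
  induction ls with
  | nil => intro l; simp [pvCnt, pvCums]
  | cons L rest ih =>
    intro l
    simp only [pvCnt, pvCums, List.length_cons]
    split_ifs with h
    · obtain ⟨h1, h2, h3⟩ := ih (l + L)
      refine ⟨by omega, ?_, ?_⟩
      · intro i hi
        match i with
        | 0 => simpa using h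
        | i + 1 => simpa using h2 i (by omega)
      · intro hlt
        simpa using h3 (by omega)
    · exact ⟨by omega, by omega, fun _ => by simpa using h⟩

theorem pvBsearch_spec (cs : List Int) (t : Int)
    (mono : ∀ i j, i ≤ j → j < cs.length → cs.getD i 0 ≤ cs.getD j 0) :
    ∀ lo hi, lo ≤ hi → hi ≤ cs.length →
    (∀ i < lo, cs.getD i 0 < t) → (∀ i, hi ≤ i → i < cs.length → ¬ cs.getD i 0 < t) →
    (pvBsearch cs t lo hi ≤ cs.length ∧
     (∀ i < pvBsearch cs t lo hi, cs.getD i 0 < t) ∧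
     (pvBsearch cs t lo hi < cs.length → ¬ cs.getD (pvBsearch cs t lo hi) 0 < t)) := by
  intro lo hi
  induction lo, hi using pvBsearch.induct cs t with
  | case1 lo hi h mid hcmp ih =>
    intro hlh hhn hlow hhigh
    rw [pvBsearch]
    simp only [dif_pos h]
    rw [if_pos hcmp]
    exact ih (by omega) hhn
      (fun i hi' => lt_of_le_of_lt (mono i mid (by omega) (by omega)) hcmp) hhigh
  | case2 lo hi h mid hcmp ih =>
    intro hlh hhn hlow hhigh
    rw [pvBsearch]
    simp only [dif_pos h]
    rw [if_neg hcmp]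
    exact ih (by omega) (by omega) hlow
      (fun i hmi hin hlt => hcmp (lt_of_le_of_lt (mono mid i (by omega) hin) hlt))
  | case3 lo hi h =>
    intro hlh hhn hlow hhigh
    rw [pvBsearch]
    simp only [dif_neg h]
    exact ⟨by omega, hlow, fun hlt => hhigh lo (by omega) hlt⟩

theorem pv_count_unique (n c r : Nat) (f : Nat → Prop)
    (hc1 : c ≤ n) (hc2 : ∀ i < c, f i) (hc3 : c < n → ¬ f c)
    (hr1 : r ≤ n) (hr2 : ∀ i < r, f i) (hr3 : r < n → ¬ f r) : c = r := by
  rcases lt_trichotomy c r with h | h | h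
  · exact absurd (hr2 c h) (hc3 (by omega))
  · exact h
  · exact absurd (hc2 r h) (hr3 (by omega))

theorem pvStr_join_singleton (sep s : String) : PySem.Str.join sep [s] = s := by
  have h := PySem.Str.toList_join sep [s]
  simp only [List.map_cons, List.map_nil, PySem.Chars.join_singleton] at h
  exact String.toList_inj.mp h

-- the cumulative table B builds, as a function of the split list
def pvCumsOf (us : List String) : List Int :=
  (((us.map PySem.Str.strip).reverse).foldl
    (fun (p : Int × List Int) u => (p.1 + PySem.Str.len u, p.2 ++ [p.1 + PySem.Str.len u]))
    (0, [])).2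

-- the whole equivalence, stated over the (arbitrary) split list
theorem pv_key (ml : Int) (us : List String) :
    PySem.Str.join " [SEP] "
      ((if pvGoA ml us.reverse 0 [] = []
        then pvGoA ml us.reverse 0 [] ++
          [PySem.Str.slice ((PySem.List.pyGet? us (-1)).getD "") (some (-ml)) none]
        else pvGoA ml us.reverse 0 []).reverse)
    = (if pvBsearch (pvCumsOf us) ml 0 (pvCumsOf us).length = 0
       then PySem.Str.slice ((PySem.List.pyGet? us (-1)).getD "") (some (-ml)) none
       else PySem.Str.join " [SEP] "
         (List.drop ((us.map PySem.Str.strip).length - pvBsearch (pvCumsOf us) ml 0 (pvCumsOf us).length)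
           (us.map PySem.Str.strip))) := by
  set parts := List.map PySem.Str.strip us with hparts
  set ls := List.map (fun u => PySem.Str.len (PySem.Str.strip u)) us.reverse with hls
  have hpr : List.map PySem.Str.strip us.reverse = parts.reverse := by
    rw [hparts, List.map_reverse]
  have hml : List.map PySem.Str.len parts.reverse = ls := by
    rw [hparts, ← List.map_reverse, List.map_map]; rfl
  have hcums : pvCumsOf us = pvCums 0 ls := by
    unfold pvCumsOf
    rw [pvCums_fold, List.nil_append, ← hparts, hml]
  rw [hcums]
  have hnn : ∀ L ∈ ls, 0 ≤ L := by
    intro L hL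
    rw [hls] at hL
    simp only [List.mem_map] at hL
    obtain ⟨u, _, rfl⟩ := hL
    rw [PySem.Str.len_eq]; positivity
  have hlen : (pvCums 0 ls).length = ls.length := pvCums_length ls 0
  have hmono := pvCums_mono ls hnn 0
  set r := pvBsearch (pvCums 0 ls) ml 0 (pvCums 0 ls).length with hr
  have hbs := pvBsearch_spec (pvCums 0 ls) ml
      (by intro i j hij hj; exact hmono i j hij (by omega))
      0 (pvCums 0 ls).length (by omega) (by omega) (by omega)
      (fun i h1 h2 => by omega)
  rw [← hr] at hbs
  have hcs := pvCnt_spec ml ls 0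
  have hcr : pvCnt ml ls 0 = r :=
    pv_count_unique ls.length (pvCnt ml ls 0) r
      (fun i => (pvCums 0 ls).getD i 0 < ml)
      hcs.1 hcs.2.1 hcs.2.2 (by omega) hbs.2.1 (by intro h; exact hbs.2.2 (by omega))
  have hgo := pvGoA_eq_take ml us.reverse 0 []
  have hchosen : pvGoA ml us.reverse 0 [] = parts.reverse.take (pvCnt ml ls 0) := by
    rw [hgo, List.nil_append, hpr]
  rw [hchosen]
  have hlslen : ls.length = parts.length := by rw [hls, hparts]; simp
  by_cases hz : pvCnt ml ls 0 = 0
  · have hr0 : r = 0 := by omega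
    rw [hz, List.take_zero]
    simp [hr0, pvStr_join_singleton]
  · have hcle : pvCnt ml ls 0 ≤ parts.length := by have := hcs.1; omega
    have hne : parts.reverse.take (pvCnt ml ls 0) ≠ [] := by
      simp only [ne_eq, List.take_eq_nil_iff, List.reverse_eq_nil_iff]
      intro h
      rcases h with h | h
      · exact hz h
      · refine hz ?_
        have h1 := hcs.1
        have h2 : ls.length = 0 := by rw [hlslen, h]; rfl
        omega
    have hrne : ¬ r = 0 := by omega
    rw [if_neg hne, if_neg hrne]
    congr 1
    rw [← hcr, List.reverse_take]
    simp

-- ===== VERDICT (by name: the statement is the Claim_ definition above) =====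
theorem obtain_length_spec : Claim_equal_obtain_length := by
  intro ctx max_length _
  show obtain_length ctx max_length = obtain_length_alt ctx max_length
  exact pv_key max_length ((PySem.Str.split? ctx "[SEP]").getD [])
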